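-- pv_equiv track=rewrite | github.com/hpcyhr/SparseFlow | Kernels/conv2d.py | choose_group_size
-- ===== SOURCE A (Python) =====
-- def choose_group_size(c_in: int) -> int:
--     if c_in <= 128:
--         gs = 16
--     else:
--         gs = 32
--     num_groups = (c_in + gs - 1) // gs
--     while num_groups > 32:
--         gs *= 2
--         num_groups = (c_in + gs - 1) // gs
--     return gs
-- ===== SOURCE B (Python) =====
-- def choose_group_size(c_in: int) -> int:
--     if c_in <= 128:
--         return 16
--     need = (c_in + 31) // 32          # smallest gs with ceil(c_in/gs) <= 32
--     return max(32, 1 << (need - 1).bit_length())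
-- ===== Notes on version B (the rewrite author's own statement) =====
-- stated objective: simpler
-- what changed: Replaced the doubling loop with a closed form: the loop stops at the smallest power-of-two group size gs >= ceil(c_in/32), computed directly via bit_length.
import Mathlib
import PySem

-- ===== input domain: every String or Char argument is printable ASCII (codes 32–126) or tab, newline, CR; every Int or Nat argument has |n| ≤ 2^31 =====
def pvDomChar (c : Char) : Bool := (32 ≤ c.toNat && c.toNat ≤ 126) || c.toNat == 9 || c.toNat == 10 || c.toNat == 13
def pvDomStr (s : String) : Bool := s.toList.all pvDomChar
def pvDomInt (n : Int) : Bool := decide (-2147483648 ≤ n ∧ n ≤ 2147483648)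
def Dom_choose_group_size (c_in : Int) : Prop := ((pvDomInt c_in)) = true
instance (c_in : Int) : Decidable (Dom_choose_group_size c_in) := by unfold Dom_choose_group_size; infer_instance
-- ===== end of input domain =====

-- B replaces A's doubling loop by the closed form max(32, 2^bit_length(ceil(c_in/32)-1)); same value, no loop.

-- ===== PORT A =====
-- the while loop of A: 'while (c_in + gs - 1) // gs > 32: gs *= 2'
-- (the '0 < gs' conjunct is only a totality guard; gs starts at 16 or 32, so it always holds)
def chooseLoop (c_in : Int) (gs : Int) : Int :=
  if h : 0 < gs ∧ 32 < PySem.Int.floordiv (c_in + gs - 1) gs then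
    chooseLoop c_in (gs * 2)
  else gs
termination_by (c_in - gs).toNat
decreasing_by
  rcases h with ⟨hgs, hng⟩
  have h33 : (33:Int) * gs ≤ c_in + gs - 1 :=
    (PySem.Int.le_floordiv_iff_mul_le hgs).mp (by omega)
  omega

def choose_group_size (c_in : Int) : Int :=
  let gs : Int := if c_in ≤ 128 then 16 else 32
  chooseLoop c_in gs

-- ===== PORT B =====
def choose_group_size_alt (c_in : Int) : Int :=
  if c_in ≤ 128 then 16
  else
    let need := PySem.Int.floordiv (c_in + 31) 32
    max 32 ((1 : Int) <<< PySem.Int.bitLength (need - 1))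

-- ===== PRECONDITION & SPEC =====
def Spec_choose_group_size (c_in : Int) (out : Int) : Prop := out = choose_group_size_alt c_in
instance (c_in : Int) (out : Int) : Decidable (Spec_choose_group_size c_in out) := by unfold Spec_choose_group_size; infer_instance

-- ===== CLAIM (what is proved, stated in full; the proofs are below) =====
def Claim_equal_choose_group_size : Prop := ∀ (c_in : Int), Dom_choose_group_size c_in → Spec_choose_group_size c_in (choose_group_size c_in)

-- ===== LEMMAS AND PROOFS =====

-- if the loop guard already fails, the loop returns gs
lemma chooseLoop_done (c_in gs : Int) (hgs : 0 < gs) (h : c_in ≤ 32 * gs) :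
    chooseLoop c_in gs = gs := by
  rw [chooseLoop.eq_def]
  have : ¬ (0 < gs ∧ 32 < PySem.Int.floordiv (c_in + gs - 1) gs) := by
    intro ⟨_, hlt⟩
    have h33 : (33:Int) * gs ≤ c_in + gs - 1 :=
      (PySem.Int.le_floordiv_iff_mul_le hgs).mp (by omega)
    omega
  rw [dif_neg this]

-- if the guard holds, one step of the loop
lemma chooseLoop_step (c_in gs : Int) (hgs : 0 < gs) (h : 32 * gs < c_in) :
    chooseLoop c_in gs = chooseLoop c_in (gs * 2) := by
  rw [chooseLoop.eq_def]
  have : 0 < gs ∧ 32 < PySem.Int.floordiv (c_in + gs - 1) gs := by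
    refine ⟨hgs, ?_⟩
    have h33 : (33:Int) ≤ PySem.Int.floordiv (c_in + gs - 1) gs :=
      (PySem.Int.le_floordiv_iff_mul_le hgs).mpr (by omega)
    omega
  rw [dif_pos this]

-- the loop lands exactly on gs * 2^m when that is the first doubling satisfying c_in ≤ 32·gs·2^m
lemma chooseLoop_reach (c_in : Int) (m : Nat) :
    ∀ gs : Int, 0 < gs → c_in ≤ 32 * (gs * 2 ^ m) →
    (∀ j : Nat, j < m → 32 * (gs * 2 ^ j) < c_in) →
    chooseLoop c_in gs = gs * 2 ^ m := by
  induction m with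
  | zero =>
    intro gs hgs hub _
    simpa using chooseLoop_done c_in gs hgs (by simpa using hub)
  | succ m ih =>
    intro gs hgs hub hlb
    have h0 : 32 * gs < c_in := by simpa using hlb 0 (Nat.succ_pos m)
    rw [chooseLoop_step c_in gs hgs h0]
    have := ih (gs * 2) (by omega)
      (by rw [pow_succ] at hub; linarith [hub])
      (by intro j hj
          have := hlb (j + 1) (by omega)
          rw [pow_succ] at this
          linarith [this])
    rw [this]; ring

theorem choose_group_size_spec : Claim_equal_choose_group_size := by
  intro c_in _
  unfold Spec_choose_group_size choose_group_size choose_group_size_alt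
  by_cases hle : c_in ≤ 128
  · simp only [hle, if_pos]
    exact chooseLoop_done c_in 16 (by norm_num) (by omega)
  · simp only [hle, if_false]
    have hc : 128 < c_in := by omega
    have hfd : PySem.Int.floordiv (c_in + 31) 32 = (c_in + 31) / 32 :=
      PySem.Int.floordiv_eq_ediv_of_pos (by norm_num)
    set need : Int := PySem.Int.floordiv (c_in + 31) 32 with hneed
    have hneed5 : 5 ≤ need := by rw [hfd] at hneed ⊢; omega
    have hneed_ub : c_in ≤ 32 * need := by rw [hfd] at hneed ⊢; omega
    have hneed_lb : 32 * (need - 1) < c_in := by rw [hfd] at hneed ⊢; omega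
    set b : Nat := PySem.Int.bitLength (need - 1) with hb
    have hub : need - 1 < 2 ^ b := by
      have h1 := PySem.Int.lt_two_pow_bitLength (need - 1)
      rw [← hb] at h1
      have h2 : ((need - 1).natAbs : Int) < ((2 ^ b : Nat) : Int) := by exact_mod_cast h1
      push_cast at h2
      rwa [abs_of_nonneg (by omega : (0:Int) ≤ need - 1)] at h2
    have hlbp : (2 : Int) ^ (b - 1) ≤ need - 1 := by
      have h1 := PySem.Int.two_pow_bitLength_le (need - 1) (by omega)
      rw [← hb] at h1
      have h2 : (((2 ^ (b - 1) : Nat)) : Int) ≤ ((need - 1).natAbs : Int) := by exact_mod_cast h1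
      push_cast at h2
      rwa [abs_of_nonneg (by omega : (0:Int) ≤ need - 1)] at h2
    have hshift : (1 : Int) <<< b = 2 ^ b := by simp [Int.shiftLeft_eq]
    rw [hshift]
    by_cases h32 : need ≤ 32
    · -- 2^b ≤ 32, so B returns 32; A's loop stops immediately at gs = 32
      have hb5 : b ≤ 5 := by
        by_contra hgt
        have h6 : 6 ≤ b := by omega
        have : (2:Int) ^ 5 ≤ 2 ^ (b - 1) := by
          apply pow_le_pow_right₀ (by norm_num) (by omega)
        omega
      have hple : (2:Int) ^ b ≤ 32 := by
        calc (2:Int) ^ b ≤ 2 ^ 5 := pow_le_pow_right₀ (by norm_num) hb5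
        _ = 32 := by norm_num
      have hmax : max (32:Int) (2 ^ b) = 32 := by omega
      rw [hmax]
      exact chooseLoop_done c_in 32 (by norm_num) (by omega)
    · -- need > 32: b ≥ 6 and the loop reaches 32 * 2^(b-5) = 2^b
      have hb6 : 6 ≤ b := by
        by_contra hlt
        have : (2:Int) ^ b ≤ 2 ^ 5 := pow_le_pow_right₀ (by norm_num) (by omega)
        omega
      have hpow_ge : (32:Int) < 2 ^ b := by
        have : (2:Int) ^ 6 ≤ 2 ^ b := pow_le_pow_right₀ (by norm_num) hb6
        omega
      have hmax : max (32:Int) (2 ^ b) = 2 ^ b := by omega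
      rw [hmax]
      have hsplit : (32:Int) * 2 ^ (b - 5) = 2 ^ b := by
        have : (2:Int) ^ b = 2 ^ 5 * 2 ^ (b - 5) := by
          rw [← pow_add]; congr 1; omega
        rw [this]; norm_num
      have := chooseLoop_reach c_in (b - 5) 32 (by norm_num)
        (by rw [hsplit]; omega)
        (by intro j hj
            have hjb : j + 5 ≤ b - 1 := by omega
            have hmono : (2:Int) ^ (j + 5) ≤ 2 ^ (b - 1) :=
              pow_le_pow_right₀ (by norm_num) hjb
            have : (32:Int) * 2 ^ j = 2 ^ (j + 5) := by rw [pow_add]; ring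
            nlinarith [hmono, hlbp, hneed_lb])
      rw [this, hsplit]
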